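-- pv_equiv track=rewrite | github.com/ShaiFeld18/labs | excercises/ex5/wordsearch.py | upright_diagonal_strings
-- ===== SOURCE A (Python) =====
-- MATRIX_MODEL = list[list[str]]
--
-- def upright_diagonal_strings(matrix: MATRIX_MODEL) -> list[str]:
--     """
--     Creates upright diagonal strings from a matrix.
--     :param matrix: Matrx
--     :return: list of strings representing diagonals uprightwards.
--     """
--     rows, cols = len(matrix), len(matrix[0])
--     diagonals = []
--     starting_row, starting_col = 0, 0
--     while starting_col < cols:
--         diagonals.append('')
--         row, col = starting_row, starting_col
--         while row >= 0 and col < cols: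
--             diagonals[len(diagonals) - 1] += matrix[row][col]
--             row -= 1
--             col += 1
--         starting_row = starting_row + 1 if len(diagonals) < rows else rows - 1
--         starting_col = 0 if len(diagonals) < rows else starting_col + 1
--     return diagonals
-- ===== SOURCE B (Python) =====
-- def upright_diagonal_strings(matrix):
--     """Bucket each cell into its anti-diagonal (index row+col) in one pass."""
--     rows, cols = len(matrix), len(matrix[0])
--     if cols == 0:
--         return []
--     buckets = [''] * (rows + cols - 1)
--     for row in range(rows - 1, -1, -1):
--         for col in range(cols):
--             buckets[row + col] += matrix[row][col]
--     return buckets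
-- ===== Notes on version B (the rewrite author's own statement) =====
-- stated objective: simpler
-- what changed: Replaces A's moving start-point state machine (nested while loops mutating starting_row/starting_col) with a single bucketing pass that appends each cell matrix[row][col] to bucket row+col, iterating rows bottom-up.
import Mathlib
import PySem

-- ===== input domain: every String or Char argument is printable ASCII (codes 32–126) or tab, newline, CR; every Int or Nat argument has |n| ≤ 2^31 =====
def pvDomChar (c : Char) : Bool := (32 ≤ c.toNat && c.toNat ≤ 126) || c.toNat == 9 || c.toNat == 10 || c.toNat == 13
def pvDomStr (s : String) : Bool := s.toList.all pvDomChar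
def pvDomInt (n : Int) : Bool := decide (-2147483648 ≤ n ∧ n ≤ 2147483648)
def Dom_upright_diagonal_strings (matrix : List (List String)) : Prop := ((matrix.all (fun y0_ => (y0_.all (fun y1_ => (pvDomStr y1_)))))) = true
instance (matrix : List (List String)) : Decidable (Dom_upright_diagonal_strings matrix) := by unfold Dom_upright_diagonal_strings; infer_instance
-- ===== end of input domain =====

-- B replaces A's moving start-point state machine with a bucketing pass keyed by row+col (same cost, simpler decomposition).


-- ===== PORT A =====
-- inner while loop of A: walks up-right from (row, col), appending matrix[row][col].
-- The Nat argument is fuel making the recursion structural; callers pass enough ((row+1).toNat),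
-- so at fuel 0 the guard 0 ≤ row is false anyway and returning acc matches the loop exit.
-- pyGetD with default only fires outside Pre_ (where Python raises IndexError).
def uprightInner (matrix : List (List String)) (cols : Int) : Nat → Int → Int → String → String
  | 0, _, _, acc => acc
  | fuel + 1, row, col, acc =>
    if 0 ≤ row ∧ col < cols then
      uprightInner matrix cols fuel (row - 1) (col + 1)
        (acc ++ PySem.List.pyGetD (PySem.List.pyGetD matrix row []) col "")
    else acc

-- outer while loop of A, carrying diagonals / starting_row / starting_col; fuel (rows+cols).toNat
-- from the wrapper exceeds the loop's iteration count, so fuel never runs out while the guard holds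
def uprightOuter (matrix : List (List String)) (rows cols : Int) :
    Nat → List String → Int → Int → List String
  | 0, diagonals, _, _ => diagonals
  | fuel + 1, diagonals, starting_row, starting_col =>
    if starting_col < cols then
      let diags := diagonals ++
        [uprightInner matrix cols (starting_row + 1).toNat starting_row starting_col ""]
      if (diags.length : Int) < rows then
        uprightOuter matrix rows cols fuel diags (starting_row + 1) 0
      else
        uprightOuter matrix rows cols fuel diags (rows - 1) (starting_col + 1)
    else diagonals

def upright_diagonal_strings (matrix : List (List String)) : List String :=
  uprightOuter matrix (matrix.length : Int) ((PySem.List.pyGetD matrix 0 []).length : Int)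
    (((matrix.length : Int) + ((PySem.List.pyGetD matrix 0 []).length : Int)).toNat) [] 0 0

-- ===== PORT B =====
def upright_diagonal_strings_alt (matrix : List (List String)) : List String :=
  let rows : Int := matrix.length
  let cols : Int := (PySem.List.pyGetD matrix 0 []).length
  if cols = 0 then []
  else
    (PySem.List.pyRange (rows - 1) (-1) (-1)).foldl (fun buckets row =>
      (PySem.List.pyRange 0 cols 1).foldl (fun buckets col =>
        -- buckets[row+col] += matrix[row][col]; 0 ≤ row+col < len(buckets) always, so pySetD/pyGetD are exact
        PySem.List.pySetD buckets (row + col)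
          (PySem.List.pyGetD buckets (row + col) "" ++
            PySem.List.pyGetD (PySem.List.pyGetD matrix row []) col "")) buckets)
      (List.replicate (rows + cols - 1).toNat "")

-- ===== PRECONDITION & SPEC =====
-- Pre_ excludes exactly the inputs where Python A raises IndexError: the empty matrix
-- (len(matrix[0])) and ragged matrices with some row shorter than the first row.
def Pre_upright_diagonal_strings (matrix : List (List String)) : Prop :=
  matrix ≠ [] ∧ ∀ row ∈ matrix, (matrix.headD []).length ≤ row.length
instance (matrix : List (List String)) : Decidable (Pre_upright_diagonal_strings matrix) := by
  unfold Pre_upright_diagonal_strings; infer_instance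

def pvWitness_upright_diagonal_strings : List (List String) := [["a", "b"], ["c", "d"]]

def Spec_upright_diagonal_strings (matrix : List (List String)) (out : List String) : Prop := out = upright_diagonal_strings_alt matrix
instance (matrix : List (List String)) (out : List String) : Decidable (Spec_upright_diagonal_strings matrix out) := by unfold Spec_upright_diagonal_strings; infer_instance

-- ===== CLAIM (what is proved, stated in full; the proofs are below) =====
def Claim_equal_upright_diagonal_strings : Prop := ∀ (matrix : List (List String)), Dom_upright_diagonal_strings matrix → Pre_upright_diagonal_strings matrix → Spec_upright_diagonal_strings matrix (upright_diagonal_strings matrix)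

-- ===== LEMMAS AND PROOFS =====

-- cell (r, c) of the matrix, with the same out-of-range default the ports use
def cellStr (m : List (List String)) (r c : Nat) : String := (m.getD r []).getD c ""

-- the up-right chain starting at (r, c): cells (r, c), (r-1, c+1), …, stopping at row 0 or column C
def chainUp (m : List (List String)) (C : Nat) : Nat → Nat → String
  | 0, c => if c < C then cellStr m 0 c else ""
  | r + 1, c => if c < C then cellStr m (r + 1) c ++ chainUp m C r (c + 1) else ""

-- the s-th upright diagonal of an R×C matrix
def diagS (m : List (List String)) (R C s : Nat) : String :=
  chainUp m C (min s (R - 1)) (s - min s (R - 1))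

lemma chainUp_of_ge (m : List (List String)) (C : Nat) (r c : Nat) (h : C ≤ c) :
    chainUp m C r c = "" := by
  cases r <;> simp [chainUp, Nat.not_lt.mpr h]

lemma cellStr_py (m : List (List String)) (r c : Nat) :
    PySem.List.pyGetD (PySem.List.pyGetD m ((r : Nat) : Int) []) ((c : Nat) : Int) "" = cellStr m r c := by
  simp [cellStr]

lemma uprightInner_neg (m : List (List String)) (cols : Int) :
    ∀ (fuel : Nat) (row col : Int) (acc : String), row < 0 →
      uprightInner m cols fuel row col acc = acc := by
  intro fuel
  cases fuel with
  | zero => intro _ _ acc _; rfl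
  | succ f => intro row col acc h; rw [uprightInner, if_neg (by omega)]

lemma uprightInner_eq (m : List (List String)) (C : Nat) :
    ∀ (fuel r c : Nat) (acc : String), r < fuel →
      uprightInner m (C : Int) fuel (r : Nat) (c : Nat) acc = acc ++ chainUp m C r c := by
  intro fuel
  induction fuel with
  | zero => intro r c acc h; exact absurd h (by omega)
  | succ f ih =>
    intro r c acc hr
    rw [uprightInner]
    by_cases hc : c < C
    · rw [if_pos ⟨by positivity, by exact_mod_cast hc⟩]
      cases r with
      | zero =>
        rw [show ((0 : Nat) : Int) - 1 = (-1 : Int) by simp,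
          uprightInner_neg m (C : Int) f _ _ _ (by omega), cellStr_py m 0 c]
        conv_rhs => rw [chainUp]
        rw [if_pos hc]
      | succ r' =>
        have h1 : ((r' + 1 : Nat) : Int) - 1 = ((r' : Nat) : Int) := by push_cast; ring
        have h2 : ((c : Nat) : Int) + 1 = ((c + 1 : Nat) : Int) := by push_cast; ring
        rw [h1, h2, ih r' (c + 1) _ (by omega), cellStr_py m (r' + 1) c]
        conv_rhs => rw [chainUp]
        rw [if_pos hc]
        simp [String.append_assoc]
    · rw [if_neg (by omega), chainUp_of_ge m C r c (by omega)]
      simp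

lemma uprightOuter_eq (m : List (List String)) (R C : Nat) (hR : 1 ≤ R) (hC : 1 ≤ C) :
    ∀ (k fuel s : Nat) (diags : List String), s = diags.length → s + k = R + C - 1 → k < fuel →
      uprightOuter m (R : Int) (C : Int) fuel diags ((min s (R - 1) : Nat) : Int)
          (((s - min s (R - 1) : Nat) : Nat) : Int)
        = diags ++ (List.range' s k).map (fun t => diagS m R C t) := by
  intro k
  induction k with
  | zero =>
    intro fuel s diags hs hsum hk
    obtain ⟨f, rfl⟩ : ∃ f, fuel = f + 1 := ⟨fuel - 1, by omega⟩
    rw [uprightOuter, if_neg (by omega)]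
    simp [List.range']
  | succ k ih =>
    intro fuel s diags hs hsum hk
    obtain ⟨f, rfl⟩ : ∃ f, fuel = f + 1 := ⟨fuel - 1, by omega⟩
    rw [uprightOuter, if_pos (show ((s - min s (R - 1) : Nat) : Int) < (C : Int) by omega)]
    have hfi : (((min s (R - 1) : Nat) : Int) + 1).toNat = min s (R - 1) + 1 := by omega
    rw [hfi, uprightInner_eq m C (min s (R - 1) + 1) (min s (R - 1)) (s - min s (R - 1)) "" (by omega)]
    by_cases h2 : s + 1 < R
    · rw [if_pos (by simp; omega)]
      have e1 : ((min s (R - 1) : Nat) : Int) + 1 = ((min (s + 1) (R - 1) : Nat) : Int) := by omega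
      have e2 : (0 : Int) = (((s + 1) - min (s + 1) (R - 1) : Nat) : Int) := by omega
      rw [e1, e2, ih f (s + 1) (diags ++ [_]) (by simp [hs]) (by omega) (by omega)]
      simp [List.range', diagS, List.append_assoc]
    · rw [if_neg (by simp; omega)]
      have e1 : (R : Int) - 1 = ((min (s + 1) (R - 1) : Nat) : Int) := by omega
      have e2 : ((s - min s (R - 1) : Nat) : Int) + 1 = (((s + 1) - min (s + 1) (R - 1) : Nat) : Int) := by omega
      rw [e1, e2, ih f (s + 1) (diags ++ [_]) (by simp [hs]) (by omega) (by omega)]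
      simp [List.range', diagS, List.append_assoc]

lemma foldInner_eq (m : List (List String)) (rn C : Nat) :
    ∀ (fuel a : Nat) (bk : List String), C - a ≤ fuel → rn + C ≤ bk.length →
      (((PySem.List.pyRange (a : Int) (C : Int) 1).foldl (fun b c =>
          PySem.List.pySetD b ((rn : Int) + c)
            (PySem.List.pyGetD b ((rn : Int) + c) "" ++
              PySem.List.pyGetD (PySem.List.pyGetD m ((rn : Int)) []) c "")) bk).length = bk.length ∧
       ∀ s : Nat, ((PySem.List.pyRange (a : Int) (C : Int) 1).foldl (fun b c =>
          PySem.List.pySetD b ((rn : Int) + c)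
            (PySem.List.pyGetD b ((rn : Int) + c) "" ++
              PySem.List.pyGetD (PySem.List.pyGetD m ((rn : Int)) []) c "")) bk).getD s ""
          = bk.getD s "" ++
            (if rn + a ≤ s ∧ s < rn + C ∧ s < bk.length then cellStr m rn (s - rn) else "")) := by
  intro fuel
  induction fuel with
  | zero =>
    intro a bk hfuel hlen
    rw [PySem.List.pyRange_one_eq_nil (by omega)]
    refine ⟨rfl, fun s => ?_⟩
    rw [if_neg (by omega)]
    simp
  | succ fuel ih =>
    intro a bk hfuel hlen
    by_cases ha : a < C
    · rw [PySem.List.pyRange_one_cons (by omega : (a : Int) < (C : Int)), List.foldl_cons]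
      have hc1 : (rn : Int) + (a : Int) = ((rn + a : Nat) : Int) := by push_cast; ring
      have hc2 : ((a : Nat) : Int) + 1 = ((a + 1 : Nat) : Int) := by push_cast; ring
      rw [hc1, hc2, PySem.List.pySetD_natCast]
      set v : String := PySem.List.pyGetD bk ((rn + a : Nat) : Int) "" ++
        PySem.List.pyGetD (PySem.List.pyGetD m ((rn : Nat) : Int) []) ((a : Nat) : Int) "" with hv
      obtain ⟨ihl, ihs⟩ := ih (a + 1) (bk.set (rn + a) v) (by omega) (by simp; omega)
      refine ⟨by rw [ihl]; simp, fun s => ?_⟩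
      rw [ihs s]
      simp only [List.length_set]
      by_cases hs : s = rn + a
      · subst hs
        rw [if_neg (by omega), if_pos (by omega)]
        have hva : v = bk.getD (rn + a) "" ++ cellStr m rn a := by
          rw [hv, cellStr_py, PySem.List.pyGetD_natCast]
        have hget : (bk.set (rn + a) v).getD (rn + a) "" = v := by
          simp [List.getD, Nat.lt_of_lt_of_le (by omega : rn + a < rn + C) hlen]
        rw [hget, hva]
        have hsub : rn + a - rn = a := by omega
        rw [hsub]
        simp
      · have hbk : (bk.set (rn + a) v).getD s "" = bk.getD s "" := by
          simp [List.getD, Ne.symm hs]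
        rw [hbk]
        by_cases hcond : rn + a ≤ s ∧ s < rn + C ∧ s < bk.length
        · rw [if_pos (by omega), if_pos hcond]
        · rw [if_neg (by omega), if_neg hcond]
    · rw [PySem.List.pyRange_one_eq_nil (by omega)]
      refine ⟨rfl, fun s => ?_⟩
      rw [if_neg (by omega)]
      simp

lemma win_chain (m : List (List String)) (C n s L : Nat) (hs : s < L) :
    (if n + 1 ≤ s ∧ s < n + 1 + C ∧ s < L then cellStr m (n + 1) (s - (n + 1)) else "")
      ++ chainUp m C (min s n) (s - min s n)
    = chainUp m C (min s (n + 1)) (s - min s (n + 1)) := by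
  by_cases hn : n + 1 ≤ s
  · have h1 : min s (n + 1) = n + 1 := by omega
    have h2 : min s n = n := by omega
    rw [h1, h2]
    conv_rhs => rw [chainUp]
    by_cases hc : s - (n + 1) < C
    · rw [if_pos ⟨hn, by omega, hs⟩, if_pos hc]
      have h3 : s - n = s - (n + 1) + 1 := by omega
      rw [h3]
    · rw [if_neg (by omega), if_neg hc]
      rw [chainUp_of_ge m C n _ (by omega)]
      simp
  · have h1 : min s (n + 1) = s := by omega
    have h2 : min s n = s := by omega
    rw [h1, h2, if_neg (by omega)]
    simp

lemma foldRows_eq (m : List (List String)) (C : Nat) :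
    ∀ (n : Nat) (bk : List String), n + C ≤ bk.length →
      (((PySem.List.pyRange (n : Int) (-1) (-1)).foldl (fun buckets row =>
          (PySem.List.pyRange 0 (C : Int) 1).foldl (fun b c =>
            PySem.List.pySetD b (row + c)
              (PySem.List.pyGetD b (row + c) "" ++
                PySem.List.pyGetD (PySem.List.pyGetD m row []) c "")) buckets) bk).length = bk.length ∧
       ∀ s : Nat, s < bk.length →
        ((PySem.List.pyRange (n : Int) (-1) (-1)).foldl (fun buckets row =>
          (PySem.List.pyRange 0 (C : Int) 1).foldl (fun b c =>
            PySem.List.pySetD b (row + c)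
              (PySem.List.pyGetD b (row + c) "" ++
                PySem.List.pyGetD (PySem.List.pyGetD m row []) c "")) buckets) bk).getD s ""
          = bk.getD s "" ++ chainUp m C (min s n) (s - min s n)) := by
  intro n
  induction n with
  | zero =>
    intro bk hlen
    rw [PySem.List.pyRange_neg_one_cons (by simp), List.foldl_cons,
      PySem.List.pyRange_neg_one_eq_nil (by simp), List.foldl_nil]
    obtain ⟨il, isp⟩ := foldInner_eq m 0 C C 0 bk (by omega) (by omega)
    simp only [Nat.cast_zero] at il isp
    simp only [Nat.cast_zero]
    refine ⟨il, fun s hs => ?_⟩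
    rw [isp s]
    simp only [Nat.min_zero, Nat.sub_zero, Nat.zero_add, Nat.add_zero]
    rw [chainUp]
    by_cases hc : s < C
    · rw [if_pos ⟨by omega, hc, hs⟩, if_pos hc]
    · rw [if_neg (by omega), if_neg hc]
  | succ n ih =>
    intro bk hlen
    rw [PySem.List.pyRange_neg_one_cons (by omega), List.foldl_cons]
    have hc1 : ((n + 1 : Nat) : Int) - 1 = ((n : Nat) : Int) := by push_cast; ring
    rw [hc1]
    obtain ⟨il, isp⟩ := foldInner_eq m (n + 1) C C 0 bk (by omega) (by omega)
    simp only [Nat.cast_zero] at il isp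
    obtain ⟨rl, rsp⟩ := ih ((PySem.List.pyRange (0 : Int) (C : Int) 1).foldl (fun b c =>
        PySem.List.pySetD b (((n + 1 : Nat) : Int) + c)
          (PySem.List.pyGetD b (((n + 1 : Nat) : Int) + c) "" ++
            PySem.List.pyGetD (PySem.List.pyGetD m ((n + 1 : Nat) : Int) []) c "")) bk)
      (by rw [il]; omega)
    refine ⟨by rw [rl, il], fun s hs => ?_⟩
    rw [rsp s (by rw [il]; exact hs), isp s]
    simp only [Nat.add_zero]
    rw [String.append_assoc, win_chain m C n s bk.length hs]

lemma portA_eq (m : List (List String)) (hC : 1 ≤ (PySem.List.pyGetD m 0 []).length) :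
    upright_diagonal_strings m
      = (List.range (m.length + (PySem.List.pyGetD m 0 []).length - 1)).map
          (fun t => diagS m m.length (PySem.List.pyGetD m 0 []).length t) := by
  have hR : 1 ≤ m.length := by
    cases m with
    | nil => simp [PySem.List.pyGetD_zero] at hC
    | cons a l => simp
  have h := uprightOuter_eq m m.length (PySem.List.pyGetD m 0 []).length hR hC
    (m.length + (PySem.List.pyGetD m 0 []).length - 1)
    (((m.length : Int) + ((PySem.List.pyGetD m 0 []).length : Int)).toNat) 0 [] rfl (by omega)
    (by omega)
  simp only [Nat.zero_min, Nat.zero_sub, Nat.cast_zero, List.nil_append] at h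
  unfold upright_diagonal_strings
  rw [h, List.range_eq_range']

lemma portB_eq (m : List (List String)) (hC : 1 ≤ (PySem.List.pyGetD m 0 []).length) :
    upright_diagonal_strings_alt m
      = (List.range (m.length + (PySem.List.pyGetD m 0 []).length - 1)).map
          (fun t => diagS m m.length (PySem.List.pyGetD m 0 []).length t) := by
  have hR : 1 ≤ m.length := by
    cases m with
    | nil => simp [PySem.List.pyGetD_zero] at hC
    | cons a l => simp
  unfold upright_diagonal_strings_alt
  rw [if_neg (show ¬((((PySem.List.pyGetD m 0 []).length : Nat) : Int) = 0) by omega)]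
  have e1 : ((m.length : Int) - 1) = (((m.length - 1 : Nat) : Nat) : Int) := by omega
  have e2 : (((m.length : Int)) + ((PySem.List.pyGetD m 0 []).length : Int) - 1).toNat
      = m.length + (PySem.List.pyGetD m 0 []).length - 1 := by omega
  rw [e1, e2]
  obtain ⟨hl, hsp⟩ := foldRows_eq m (PySem.List.pyGetD m 0 []).length (m.length - 1)
    (List.replicate (m.length + (PySem.List.pyGetD m 0 []).length - 1) "") (by simp; omega)
  apply List.ext_getElem
  · rw [hl]; simp
  · intro i h1 h2
    have hi : i < m.length + (PySem.List.pyGetD m 0 []).length - 1 := by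
      simpa using h2
    rw [← List.getD_eq_getElem _ "" h1, hsp i (by simpa using hi)]
    simp [diagS]

lemma ports_eq (m : List (List String)) :
    upright_diagonal_strings m = upright_diagonal_strings_alt m := by
  by_cases hC : (PySem.List.pyGetD m 0 []).length = 0
  · unfold upright_diagonal_strings upright_diagonal_strings_alt
    rw [if_pos (show (((PySem.List.pyGetD m 0 []).length : Nat) : Int) = 0 by omega)]
    cases hf : ((m.length : Int) + ((PySem.List.pyGetD m 0 []).length : Int)).toNat with
    | zero => rfl
    | succ f =>
      rw [uprightOuter, if_neg (show ¬((0 : Int) < ((PySem.List.pyGetD m 0 []).length : Int)) by omega)]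
  · rw [portA_eq m (by omega), portB_eq m (by omega)]

-- ===== VERDICT (by name: the statement is the Claim_ definition above) =====
theorem upright_diagonal_strings_spec : Claim_equal_upright_diagonal_strings := by
  intro matrix _ _
  unfold Spec_upright_diagonal_strings
  exact ports_eq matrix
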